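-- pv_equiv track=rewrite | github.com/marshimarocj/toolkit | wordnet.py | retrieve_dst_nodes_from_node
-- ===== SOURCE A (Python) =====
-- def retrieve_dst_nodes_from_node(node, node2hyponyms):
--   dst_nodes = []
--   if node in node2hyponyms:
--     hyponyms = node2hyponyms[node]
--     for hyponym in hyponyms:
--       result = retrieve_dst_nodes_from_node(hyponym, node2hyponyms)
--       dst_nodes.extend(result)
--   else:
--     dst_nodes.append(node)
--   return dst_nodes
-- ===== SOURCE B (Python) =====
-- def retrieve_dst_nodes_from_node(node, node2hyponyms):
--   dst_nodes = []
--   stack = [node]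
--   while stack:
--     n = stack.pop()
--     children = node2hyponyms.get(n)
--     if children is None:
--       dst_nodes.append(n)
--     else:
--       stack.extend(reversed(children))
--   return dst_nodes
-- ===== Notes on version B (the rewrite author's own statement) =====
-- stated objective: alternative
-- what changed: Replaces A's recursive descent with an iterative explicit-stack DFS that pops a node, pushes its hyponyms in reverse, and appends leaves to the output in the same order.
import Mathlib
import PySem

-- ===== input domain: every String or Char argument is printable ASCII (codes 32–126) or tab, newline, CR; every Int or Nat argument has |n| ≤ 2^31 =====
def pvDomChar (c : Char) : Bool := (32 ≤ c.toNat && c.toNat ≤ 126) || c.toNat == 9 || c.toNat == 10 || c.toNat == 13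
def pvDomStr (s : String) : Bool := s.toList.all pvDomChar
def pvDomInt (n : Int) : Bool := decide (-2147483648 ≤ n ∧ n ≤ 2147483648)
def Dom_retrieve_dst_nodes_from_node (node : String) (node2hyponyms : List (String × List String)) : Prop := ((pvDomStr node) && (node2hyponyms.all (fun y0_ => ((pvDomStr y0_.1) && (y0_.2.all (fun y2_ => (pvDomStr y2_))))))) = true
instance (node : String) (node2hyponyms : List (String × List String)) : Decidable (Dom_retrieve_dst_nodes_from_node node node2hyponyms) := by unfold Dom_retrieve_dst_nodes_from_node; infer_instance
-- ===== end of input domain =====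

-- B replaces A's recursion by an iterative explicit-stack DFS (same leaf order); objective: alternative decomposition.
-- Equivalence is about the return value; neither program mutates its arguments.

-- ===== PORT A =====
-- first-match association-list lookup = Python dict membership/subscript under the task's type convention
def pvLkp (d : List (String × List String)) (k : String) : Option (List String) :=
  match d with
  | [] => none
  | (a, b) :: t => if a == k then some b else pvLkp t k

-- literal port of A's recursion; the Nat fuel only makes it total (Pre_ guarantees
-- recursion depth ≤ d.length + 1, so the fuel is never exhausted on admitted inputs)
def pvDfsA (fuel : Nat) (node : String) (d : List (String × List String)) : List String :=
  match fuel with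
  | 0 => []
  | f + 1 =>
    match pvLkp d node with
    | some hyps => hyps.foldl (fun acc h => acc ++ pvDfsA f h d) []
    | none => [node]

def retrieve_dst_nodes_from_node (node : String) (node2hyponyms : List (String × List String)) : List String :=
  pvDfsA (node2hyponyms.length + 1) node node2hyponyms

-- ===== PORT B =====
-- head of the list is the top of the stack, so Python's stack.extend(reversed(children))
-- followed by popping from the end is `cs ++ rest` here
def pvLoopB (fuel : Nat) (d : List (String × List String)) (stack out : List String) : List String :=
  match fuel with
  | 0 => out
  | f + 1 =>
    match stack with
    | [] => out
    | n :: rest =>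
      match pvLkp d n with
      | some cs => pvLoopB f d (cs ++ rest) out
      | none => pvLoopB f d rest (out ++ [n])

def pvMaxKids (d : List (String × List String)) : Nat :=
  d.foldl (fun m p => max m p.2.length) 0

-- fuel bound for the while-loop guard: it dominates the total number of loop iterations
-- on admitted inputs, so the guard never fires there
def pvFuelB (d : List (String × List String)) : Nat :=
  (pvMaxKids d + 1) ^ (d.length + 1)

def retrieve_dst_nodes_from_node_alt (node : String) (node2hyponyms : List (String × List String)) : List String :=
  pvLoopB (pvFuelB node2hyponyms) node2hyponyms [node] []

-- ===== PRECONDITION & SPEC =====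
def pvKids (d : List (String × List String)) (x : String) : List String :=
  ((d.find? (fun p => p.1 == x)).map Prod.snd).getD []

def pvEx (d : List (String × List String)) (S : List String) : List String :=
  PySem.List.dedup (S ++ S.flatMap (pvKids d))

def pvAllNodes (d : List (String × List String)) : List String :=
  d.flatMap (fun p => p.1 :: p.2)

-- set of nodes reachable from S along hyponym edges (iterated one-step expansion to a fixpoint)
def pvClos (d : List (String × List String)) (S : List String) : List String :=
  (pvEx d)^[(pvAllNodes d).length + 1] S

-- Pre_ excludes exactly the inputs on which a hyponym cycle is reachable from `node`:
-- there the Python A recurses forever (RecursionError), so it returns no value.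
def Pre_retrieve_dst_nodes_from_node (node : String) (node2hyponyms : List (String × List String)) : Prop :=
  ∀ k ∈ pvClos node2hyponyms [node], k ∉ pvClos node2hyponyms (pvKids node2hyponyms k)

instance (node : String) (node2hyponyms : List (String × List String)) : Decidable (Pre_retrieve_dst_nodes_from_node node node2hyponyms) := by
  unfold Pre_retrieve_dst_nodes_from_node; infer_instance

def pvWitness_retrieve_dst_nodes_from_node : String × (List (String × List String)) :=
  ("a", [("a", ["b", "c"]), ("b", ["c", "c"])])

def Spec_retrieve_dst_nodes_from_node (node : String) (node2hyponyms : List (String × List String)) (out : List String) : Prop := out = retrieve_dst_nodes_from_node_alt node node2hyponyms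
instance (node : String) (node2hyponyms : List (String × List String)) (out : List String) : Decidable (Spec_retrieve_dst_nodes_from_node node node2hyponyms out) := by unfold Spec_retrieve_dst_nodes_from_node; infer_instance

-- ===== CLAIM (what is proved, stated in full; the proofs are below) =====
def Claim_equal_retrieve_dst_nodes_from_node : Prop := ∀ (node : String) (node2hyponyms : List (String × List String)), Dom_retrieve_dst_nodes_from_node node node2hyponyms → Pre_retrieve_dst_nodes_from_node node node2hyponyms → Spec_retrieve_dst_nodes_from_node node node2hyponyms (retrieve_dst_nodes_from_node node node2hyponyms)

-- ===== LEMMAS AND PROOFS =====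

-- ---- basic facts about the lookup and the one-step expansion ----

theorem pvLkp_eq_find? (d : List (String × List String)) (x : String) :
    pvLkp d x = (d.find? (fun p => p.1 == x)).map Prod.snd := by
  induction d with
  | nil => simp [pvLkp]
  | cons p t ih =>
    obtain ⟨a, b⟩ := p
    by_cases hax : (a == x) = true
    · simp [pvLkp, hax]
    · simp [pvLkp, hax, ih]

theorem pvKids_eq (d : List (String × List String)) (x : String) :
    pvKids d x = (pvLkp d x).getD [] := by
  rw [pvLkp_eq_find?]; rfl

theorem pvLkp_mem {d : List (String × List String)} {x : String} {cs : List String}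
    (h : pvLkp d x = some cs) : (x, cs) ∈ d := by
  induction d with
  | nil => simp [pvLkp] at h
  | cons p t ih =>
    obtain ⟨a, b⟩ := p
    by_cases hax : (a == x) = true
    · simp only [pvLkp, hax, if_true, Option.some.injEq] at h
      have : a = x := by simpa using hax
      subst this; subst h; exact List.mem_cons_self
    · simp only [pvLkp, hax, if_false, Bool.false_eq_true] at h
      exact List.mem_cons_of_mem _ (ih h)

theorem pvKids_sub_all {d : List (String × List String)} {y z : String}
    (h : z ∈ pvKids d y) : z ∈ pvAllNodes d := by
  rw [pvKids_eq] at h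
  cases hl : pvLkp d y with
  | none => rw [hl] at h; simp at h
  | some cs =>
    rw [hl] at h; simp at h
    have hm := pvLkp_mem hl
    unfold pvAllNodes
    exact List.mem_flatMap.2 ⟨(y, cs), hm, by simp [h]⟩

theorem pv_mem_ex {d : List (String × List String)} {S : List String} {z : String} :
    z ∈ pvEx d S ↔ z ∈ S ∨ ∃ y ∈ S, z ∈ pvKids d y := by
  simp [pvEx, List.mem_append, List.mem_flatMap]

theorem pv_sub_ex {d : List (String × List String)} {S : List String} {z : String}
    (h : z ∈ S) : z ∈ pvEx d S := pv_mem_ex.2 (Or.inl h)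

theorem pv_ex_mono {d : List (String × List String)} {S T : List String}
    (h : ∀ z ∈ S, z ∈ T) : ∀ z ∈ pvEx d S, z ∈ pvEx d T := by
  intro z hz
  rcases pv_mem_ex.1 hz with h1 | ⟨y, hy, hk⟩
  · exact pv_mem_ex.2 (Or.inl (h _ h1))
  · exact pv_mem_ex.2 (Or.inr ⟨y, h _ hy, hk⟩)

theorem pv_it_sub {d : List (String × List String)} {z : String} :
    ∀ (n : Nat) (S : List String), z ∈ S → z ∈ (pvEx d)^[n] S := by
  intro n
  induction n with
  | zero => intro S h; simpa using h
  | succ n ih =>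
    intro S h
    rw [Function.iterate_succ_apply]
    exact ih _ (pv_sub_ex h)

theorem pv_it_mono {d : List (String × List String)} :
    ∀ (n : Nat) (S T : List String), (∀ z ∈ S, z ∈ T) →
      ∀ z ∈ (pvEx d)^[n] S, z ∈ (pvEx d)^[n] T := by
  intro n
  induction n with
  | zero => intro S T h z hz; exact h z (by simpa using hz)
  | succ n ih =>
    intro S T h z hz
    rw [Function.iterate_succ_apply] at hz ⊢
    exact ih _ _ (pv_ex_mono h) z hz

theorem pv_stable {d : List (String × List String)} {T : List String}
    (hfix : ∀ z ∈ pvEx d T, z ∈ T) :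
    ∀ (m : Nat) (z : String), z ∈ (pvEx d)^[m] T → z ∈ T := by
  intro m
  induction m with
  | zero => intro z hz; simpa using hz
  | succ m ih =>
    intro z hz
    rw [Function.iterate_succ_apply] at hz
    exact ih z (pv_it_mono m (pvEx d T) T hfix z hz)

theorem pv_grow {d : List (String × List String)} {S : List String} :
    ∀ (k : Nat), (∀ i < k, ∃ z, z ∈ pvEx d ((pvEx d)^[i] S) ∧ z ∉ (pvEx d)^[i] S) →
      S.toFinset.card + k ≤ ((pvEx d)^[k] S).toFinset.card := by
  intro k
  induction k with
  | zero => intro _; simp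
  | succ k ih =>
    intro h
    obtain ⟨z, hz1, hz2⟩ := h k (Nat.lt_succ_self k)
    have hsub : ((pvEx d)^[k] S).toFinset ⊂ ((pvEx d)^[k+1] S).toFinset := by
      constructor
      · intro w hw
        rw [List.mem_toFinset] at hw ⊢
        rw [Function.iterate_succ_apply']
        exact pv_sub_ex hw
      · intro hcon
        have : z ∈ ((pvEx d)^[k] S).toFinset := by
          apply hcon
          rw [List.mem_toFinset, Function.iterate_succ_apply']
          exact hz1
        exact hz2 (List.mem_toFinset.1 this)
    have hc := Finset.card_lt_card hsub
    have := ih (fun i hi => h i (Nat.lt_succ_of_lt hi))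
    omega

theorem pv_iter_sub_all {d : List (String × List String)} {S : List String} :
    ∀ (k : Nat) (z : String), z ∈ (pvEx d)^[k] S → z ∈ S ∨ z ∈ pvAllNodes d := by
  intro k
  induction k with
  | zero => intro z hz; exact Or.inl (by simpa using hz)
  | succ k ih =>
    intro z hz
    rw [Function.iterate_succ_apply'] at hz
    rcases pv_mem_ex.1 hz with h1 | ⟨y, _, hk⟩
    · exact ih z h1
    · exact Or.inr (pvKids_sub_all hk)

theorem pv_exists_fix (d : List (String × List String)) (S : List String) :
    ∃ i ≤ (pvAllNodes d).length, ∀ z ∈ pvEx d ((pvEx d)^[i] S), z ∈ (pvEx d)^[i] S := by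
  by_contra hcon
  push Not at hcon
  set N := (pvAllNodes d).length with hN
  have hgrow : S.toFinset.card + (N + 1) ≤ ((pvEx d)^[N+1] S).toFinset.card := by
    apply pv_grow
    intro i hi
    obtain ⟨z, hz1, hz2⟩ := hcon i (Nat.lt_succ_iff.1 hi)
    exact ⟨z, hz1, hz2⟩
  have hsub : ((pvEx d)^[N+1] S).toFinset ⊆ S.toFinset ∪ (pvAllNodes d).toFinset := by
    intro w hw
    rcases pv_iter_sub_all (N+1) w (List.mem_toFinset.1 hw) with h | h
    · exact Finset.mem_union_left _ (List.mem_toFinset.2 h)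
    · exact Finset.mem_union_right _ (List.mem_toFinset.2 h)
  have hcard : ((pvEx d)^[N+1] S).toFinset.card ≤ S.toFinset.card + N := by
    calc ((pvEx d)^[N+1] S).toFinset.card
        ≤ (S.toFinset ∪ (pvAllNodes d).toFinset).card := Finset.card_le_card hsub
      _ ≤ S.toFinset.card + (pvAllNodes d).toFinset.card := Finset.card_union_le _ _
      _ ≤ S.toFinset.card + N := by
          have := List.toFinset_card_le (pvAllNodes d)
          omega
  omega

theorem pvClos_closed {d : List (String × List String)} {S : List String} {y z : String}
    (hy : y ∈ pvClos d S) (hz : z ∈ pvKids d y) : z ∈ pvClos d S := by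
  obtain ⟨i, hi, hfix⟩ := pv_exists_fix d S
  have hdecomp : pvClos d S = (pvEx d)^[(pvAllNodes d).length + 1 - i] ((pvEx d)^[i] S) := by
    unfold pvClos
    rw [← Function.iterate_add_apply]
    congr 1
    omega
  have hy' : y ∈ (pvEx d)^[i] S := by
    rw [hdecomp] at hy
    exact pv_stable hfix _ y hy
  have hz' : z ∈ (pvEx d)^[i] S :=
    hfix z (pv_mem_ex.2 (Or.inr ⟨y, hy', hz⟩))
  rw [hdecomp]
  exact pv_it_sub _ _ hz'

theorem pvClos_sub {d : List (String × List String)} {S : List String} {z : String}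
    (h : z ∈ S) : z ∈ pvClos d S := pv_it_sub _ _ h

theorem pvClos_min {d : List (String × List String)} {S T : List String}
    (h : ∀ z ∈ T, z ∈ pvClos d S) : ∀ w ∈ pvClos d T, w ∈ pvClos d S := by
  have aux : ∀ (m : Nat) (T : List String), (∀ z ∈ T, z ∈ pvClos d S) →
      ∀ w ∈ (pvEx d)^[m] T, w ∈ pvClos d S := by
    intro m
    induction m with
    | zero => intro T h w hw; exact h w (by simpa using hw)
    | succ m ih =>
      intro T h w hw
      rw [Function.iterate_succ_apply] at hw
      apply ih (pvEx d T) _ w hw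
      intro z hz
      rcases pv_mem_ex.1 hz with h1 | ⟨y, hy, hk⟩
      · exact h z h1
      · exact pvClos_closed (h y hy) hk
  exact aux _ T h

-- ---- the measure: number of keys reachable from a node ----

def pvMu (d : List (String × List String)) (x : String) : Nat :=
  ((pvClos d [x]).toFinset.filter (fun y => (pvLkp d y).isSome)).card

theorem pvMu_lt {d : List (String × List String)} {x c : String} {cs : List String}
    (hx : pvLkp d x = some cs) (hc : c ∈ cs)
    (hnc : x ∉ pvClos d (pvKids d x)) : pvMu d c < pvMu d x := by
  have hkx : pvKids d x = cs := by rw [pvKids_eq]; simp [hx]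
  have hxx : x ∈ pvClos d [x] := pvClos_sub (by simp)
  have hcx : c ∈ pvClos d [x] := pvClos_closed hxx (by rw [hkx]; exact hc)
  have hsub : ∀ w ∈ pvClos d [c], w ∈ pvClos d [x] := by
    apply pvClos_min
    intro z hz
    have : z = c := by simpa using hz
    subst this; exact hcx
  have hxnc : x ∉ pvClos d [c] := by
    intro hx'
    apply hnc
    have hsub2 : ∀ w ∈ pvClos d [c], w ∈ pvClos d (pvKids d x) := by
      apply pvClos_min
      intro z hz
      have : z = c := by simpa using hz
      subst this
      exact pvClos_sub (by rw [hkx]; exact hc)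
    exact hsub2 x hx'
  unfold pvMu
  apply Finset.card_lt_card
  constructor
  · intro w hw
    rw [Finset.mem_filter] at hw ⊢
    exact ⟨List.mem_toFinset.2 (hsub w (List.mem_toFinset.1 hw.1)), hw.2⟩
  · intro hcon
    have hxin : x ∈ (pvClos d [x]).toFinset.filter (fun y => (pvLkp d y).isSome) := by
      rw [Finset.mem_filter]
      exact ⟨List.mem_toFinset.2 hxx, by simp [hx]⟩
    have := hcon hxin
    rw [Finset.mem_filter] at this
    exact hxnc (List.mem_toFinset.1 this.1)

theorem pvMu_le {d : List (String × List String)} (x : String) : pvMu d x ≤ d.length := by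
  unfold pvMu
  have hsub : (pvClos d [x]).toFinset.filter (fun y => (pvLkp d y).isSome) ⊆ (d.map Prod.fst).toFinset := by
    intro y hy
    rw [Finset.mem_filter] at hy
    obtain ⟨cs, hcs⟩ := Option.isSome_iff_exists.1 hy.2
    have := pvLkp_mem hcs
    exact List.mem_toFinset.2 (List.mem_map.2 ⟨(y, cs), this, rfl⟩)
  calc ((pvClos d [x]).toFinset.filter (fun y => (pvLkp d y).isSome)).card
      ≤ (d.map Prod.fst).toFinset.card := Finset.card_le_card hsub
    _ ≤ (d.map Prod.fst).length := List.toFinset_card_le _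
    _ = d.length := List.length_map _

-- ---- termination certificate for the admitted inputs ----

def pvOk (d : List (String × List String)) : Nat → String → Prop
  | 0, _ => False
  | f + 1, x => ∀ cs, pvLkp d x = some cs → ∀ c ∈ cs, pvOk d f c

theorem pvOk_of_pre {d : List (String × List String)} {node : String}
    (hpre : ∀ k ∈ pvClos d [node], k ∉ pvClos d (pvKids d k)) :
    ∀ (n : Nat) (x : String), x ∈ pvClos d [node] → pvMu d x < n → pvOk d n x := by
  intro n
  induction n with
  | zero => intro x _ hmu; omega
  | succ n ih =>
    intro x hx _
    simp only [pvOk]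
    intro cs hcs c hc
    have hkx : pvKids d x = cs := by rw [pvKids_eq]; simp [hcs]
    have hcclos : c ∈ pvClos d [node] := pvClos_closed hx (by rw [hkx]; exact hc)
    have hlt := pvMu_lt hcs hc (hpre x hx)
    have hle := pvMu_le (d := d) x
    exact ih c hcclos (by omega)

-- ---- iteration counting for the stack loop ----

def pvCnt (d : List (String × List String)) : Nat → String → Nat
  | 0, _ => 0
  | f + 1, x =>
    match pvLkp d x with
    | some cs => 1 + (cs.map (pvCnt d f)).sum
    | none => 1

theorem pvLoopB_nil {d : List (String × List String)} (g : Nat) (out : List String) :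
    pvLoopB g d [] out = out := by
  cases g <;> simp [pvLoopB]

theorem pv_foldl_append {F : String → List String} :
    ∀ (cs : List String) (a : List String),
      cs.foldl (fun acc h => acc ++ F h) a = a ++ cs.flatMap F := by
  intro cs
  induction cs with
  | nil => intro a; simp
  | cons c t ih =>
    intro a
    simp only [List.foldl_cons, List.flatMap_cons, ih, List.append_assoc]

theorem pvLen_le_maxKids {d : List (String × List String)} {x : String} {cs : List String}
    (h : pvLkp d x = some cs) : cs.length ≤ pvMaxKids d := by
  have hinit : ∀ (l : List (String × List String)) (a : Nat),
      a ≤ l.foldl (fun m p => max m p.2.length) a := by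
    intro l
    induction l with
    | nil => intro a; exact Nat.le_refl a
    | cons q t ih =>
      intro a
      exact Nat.le_trans (Nat.le_max_left a q.2.length) (ih _)
  have hmem : ∀ (l : List (String × List String)) (a : Nat) (p : String × List String),
      p ∈ l → p.2.length ≤ l.foldl (fun m q => max m q.2.length) a := by
    intro l
    induction l with
    | nil => intro a p hp; simp at hp
    | cons q t ih =>
      intro a p hp
      rcases List.mem_cons.1 hp with h1 | h1
      · subst h1
        exact Nat.le_trans (Nat.le_max_right a p.2.length) (hinit t _)
      · exact ih _ p h1
  exact hmem d 0 (x, cs) (pvLkp_mem h)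

theorem pvCnt_le {d : List (String × List String)} :
    ∀ (f : Nat) (x : String), pvCnt d f x ≤ (pvMaxKids d + 1) ^ f := by
  intro f
  induction f with
  | zero => intro x; simp [pvCnt]
  | succ f ih =>
    intro x
    have hp1 : 1 ≤ (pvMaxKids d + 1) ^ f := Nat.one_le_pow _ _ (by omega)
    cases h : pvLkp d x with
    | none =>
      simp only [pvCnt, h]
      calc 1 ≤ (pvMaxKids d + 1) ^ f := hp1
        _ ≤ (pvMaxKids d + 1) ^ (f + 1) :=
            Nat.pow_le_pow_right (by omega) (by omega)
    | some cs =>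
      simp only [pvCnt, h]
      have hsum : ∀ (l : List String), (l.map (pvCnt d f)).sum ≤ l.length * (pvMaxKids d + 1) ^ f := by
        intro l
        induction l with
        | nil => simp
        | cons a t iht =>
          simp only [List.map_cons, List.sum_cons, List.length_cons]
          have h1 := ih a
          have h2 : (t.length + 1) * (pvMaxKids d + 1) ^ f
              = t.length * (pvMaxKids d + 1) ^ f + (pvMaxKids d + 1) ^ f := by ring
          omega
      have hlen := pvLen_le_maxKids h
      have hs := hsum cs
      have hmul : cs.length * (pvMaxKids d + 1) ^ f ≤ pvMaxKids d * (pvMaxKids d + 1) ^ f :=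
        Nat.mul_le_mul_right _ hlen
      have hpow : (pvMaxKids d + 1) ^ (f + 1)
          = (pvMaxKids d + 1) ^ f + pvMaxKids d * (pvMaxKids d + 1) ^ f := by ring
      omega

-- the main simulation: with Ok-certified fuel, running the stack loop on one node
-- appends exactly A's recursive result to the accumulator
theorem pv_main {d : List (String × List String)} :
    ∀ (f : Nat) (x : String) (st out : List String) (g : Nat), pvOk d f x →
      pvLoopB (pvCnt d f x + g) d (x :: st) out = pvLoopB g d st (out ++ pvDfsA f x d) := by
  intro f
  induction f with
  | zero => intro x st out g hok; simp [pvOk] at hok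
  | succ f ih =>
    intro x st out g hok
    cases h : pvLkp d x with
    | none =>
      have h1 : pvCnt d (f + 1) x = 1 := by simp [pvCnt, h]
      rw [h1, show 1 + g = g + 1 from by omega]
      simp [pvLoopB, h, pvDfsA]
    | some cs =>
      have hok' : ∀ c ∈ cs, pvOk d f c := hok cs h
      have h1 : pvCnt d (f + 1) x = 1 + (cs.map (pvCnt d f)).sum := by simp [pvCnt, h]
      rw [h1, show 1 + (cs.map (pvCnt d f)).sum + g = ((cs.map (pvCnt d f)).sum + g) + 1 from by omega]
      have hstep : pvLoopB (((cs.map (pvCnt d f)).sum + g) + 1) d (x :: st) out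
          = pvLoopB ((cs.map (pvCnt d f)).sum + g) d (cs ++ st) out := by
        simp [pvLoopB, h]
      rw [hstep]
      have aux : ∀ (l : List String), (∀ c ∈ l, pvOk d f c) → ∀ (st out : List String) (g : Nat),
          pvLoopB ((l.map (pvCnt d f)).sum + g) d (l ++ st) out
            = pvLoopB g d st (out ++ l.flatMap (fun c => pvDfsA f c d)) := by
        intro l
        induction l with
        | nil => intro _ st out g; simp
        | cons c t iht =>
          intro hall st out g
          simp only [List.map_cons, List.sum_cons, List.cons_append]
          rw [show pvCnt d f c + (t.map (pvCnt d f)).sum + g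
              = pvCnt d f c + ((t.map (pvCnt d f)).sum + g) from by omega]
          rw [ih c (t ++ st) out _ (hall c (by simp))]
          rw [iht (fun c' hc' => hall c' (by simp [hc'])) st (out ++ pvDfsA f c d) g]
          simp [List.flatMap_cons, List.append_assoc]
      rw [aux cs hok' st out g]
      congr 1
      simp only [pvDfsA, h]
      rw [pv_foldl_append]
      simp

-- ===== VERDICT (by name: the statement is the Claim_ definition above) =====
theorem retrieve_dst_nodes_from_node_spec : Claim_equal_retrieve_dst_nodes_from_node := by
  intro node node2hyponyms _ hpre
  unfold Spec_retrieve_dst_nodes_from_node retrieve_dst_nodes_from_node retrieve_dst_nodes_from_node_alt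
  have hok : pvOk node2hyponyms (node2hyponyms.length + 1) node := by
    apply pvOk_of_pre hpre
    · exact pvClos_sub (by simp)
    · have := pvMu_le (d := node2hyponyms) node
      omega
  have hcnt : pvCnt node2hyponyms (node2hyponyms.length + 1) node ≤ pvFuelB node2hyponyms := by
    unfold pvFuelB
    exact pvCnt_le _ _
  obtain ⟨g, hg⟩ := Nat.le.dest hcnt
  rw [← hg, pv_main _ _ _ _ _ hok, pvLoopB_nil]
  simp
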